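-- pv_equiv track=rewrite | github.com/r0hanshah/leetcode | countcommands.py | solution
-- ===== SOURCE A (Python) =====
-- def solution(commands):
--
--     stack = []
--     ls, cp, mv = 0,0,0
--     myindex = []
--
--
--     for command in commands:
--
--         if command == "ls":
--             ls +=1
--
--         if command == "cp":
--             cp += 1
--         if command == "mv":
--             mv += 1
--
--         if command[0]== "!":
--             myindex.append(int(command[1:]))
--
--     for i in myindex:
--         if commands[i-1] == "ls":
--             ls += 1
--         if commands[i-1] == "cp":
--             cp += 1
--         if commands[i-1] == "mv":
--             mv += 1
--
--         if commands[i-1][0] == "!":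
--             myindex.append(int(commands[i-1][1:]))
--
--     return [cp,ls,mv]
-- ===== SOURCE B (Python) =====
-- def solution(commands):
--     # Count ls/cp/mv commands; a "!k" reference counts as the command its
--     # reference chain finally lands on.  Each chain is resolved once and the
--     # terminal command is cached for every position along the way.
--     cache = {}
--
--     def terminal(p):
--         seen = []
--         while p not in cache and commands[p].startswith("!"):
--             seen.append(p)
--             p = int(commands[p][1:]) - 1
--         t = cache[p] if p in cache else commands[p]
--         for q in seen:
--             cache[q] = t
--         return t
--
--     ls = cp = mv = 0
--     for p in range(len(commands)):
--         cmd = commands[p]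
--         t = terminal(p) if cmd.startswith("!") else cmd
--         if t == "ls":
--             ls += 1
--         elif t == "cp":
--             cp += 1
--         elif t == "mv":
--             mv += 1
--     return [cp, ls, mv]
-- ===== Notes on version B (the rewrite author's own statement) =====
-- stated objective: alternative
-- what changed: A's second loop appends each followed '!' reference back onto a growing worklist and re-walks every chain link per top-level reference; B makes a single pass over positions, resolving each reference chain once with a memo cache of terminal commands (path compression), so each chain is walked once and its result reused.
import Mathlib
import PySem

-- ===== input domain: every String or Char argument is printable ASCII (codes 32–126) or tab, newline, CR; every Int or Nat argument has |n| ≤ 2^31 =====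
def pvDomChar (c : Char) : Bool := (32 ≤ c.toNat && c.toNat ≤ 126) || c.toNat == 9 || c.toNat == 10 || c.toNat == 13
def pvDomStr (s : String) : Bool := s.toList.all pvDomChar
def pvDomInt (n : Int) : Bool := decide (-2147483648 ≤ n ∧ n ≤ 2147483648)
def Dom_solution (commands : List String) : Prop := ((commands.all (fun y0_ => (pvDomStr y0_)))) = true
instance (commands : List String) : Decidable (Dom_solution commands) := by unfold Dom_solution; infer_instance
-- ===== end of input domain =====

-- B replaces A's self-extending worklist of '!index' references (which re-walks every chain link per reference)
-- by a single pass that resolves each reference chain once with a memo cache (path compression); objective: alternative algorithm.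


-- int(c[1:]) — shared by both ports (and by Pre_), exactly Python's int() on the tail of the string
def bangArg? (c : String) : Option Int := PySem.Int.ofStr? (PySem.Str.slice c (some 1) none)

-- ===== PORT A =====
-- first loop of A: counts direct "ls"/"cp"/"mv" and collects the parsed '!' indices
def pass1step (acc : (Int × Int × Int) × List Int) (command : String) : (Int × Int × Int) × List Int :=
  let ls := if command == "ls" then acc.1.1 + 1 else acc.1.1
  let cp := if command == "cp" then acc.1.2.1 + 1 else acc.1.2.1
  let mv := if command == "mv" then acc.1.2.2 + 1 else acc.1.2.2
  let myindex :=
    if PySem.Str.pyGet? command 0 == some '!' then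
      match bangArg? command with
      | some v => acc.2 ++ [v]
      | none => acc.2          -- int() ValueError: A raises, excluded by Pre_
    else acc.2
  ((ls, cp, mv), myindex)

-- second loop of A: 'for i in myindex' over a list that grows while it is iterated = a FIFO worklist;
-- fuel only bounds the recursion (A diverges on cyclic references, which Pre_ excludes; under Pre_ the fuel is never exhausted)
def loopA (commands : List String) : Nat → List Int → Int × Int × Int → Int × Int × Int
  | 0, _, acc => acc
  | _ + 1, [], acc => acc
  | fuel + 1, i :: rest, acc =>
    match PySem.List.pyGet? commands (i - 1) with
    | none => acc              -- IndexError: A raises, excluded by Pre_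
    | some t =>
      let ls := if t == "ls" then acc.1 + 1 else acc.1
      let cp := if t == "cp" then acc.2.1 + 1 else acc.2.1
      let mv := if t == "mv" then acc.2.2 + 1 else acc.2.2
      if PySem.Str.pyGet? t 0 == some '!' then
        match bangArg? t with
        | some j => loopA commands fuel (rest ++ [j]) (ls, cp, mv)
        | none => (ls, cp, mv) -- int() ValueError: A raises, excluded by Pre_
      else loopA commands fuel rest (ls, cp, mv)

def solution (commands : List String) : List Int :=
  let p := commands.foldl pass1step ((0, 0, 0), [])
  let r := loopA commands ((commands.length + 1) * (commands.length + 1)) p.2 p.1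
  [r.2.1, r.1, r.2.2]

-- ===== PORT B =====
-- B's terminal(p): follow the chain from position p collecting visited positions, stop at a cached or
-- non-'!' command, then write the terminal into the cache for every visited position.
-- fuel = len(commands)+1 bounds the while loop (B's Python while loop diverges on a cycle, excluded by Pre_)
def termLoop (commands : List String) : Nat → Int → List Int → PySem.Dict Int String → String × PySem.Dict Int String
  | 0, _, _, cache => ("", cache)   -- unreachable under Pre_ (acyclic chains have ≤ len(commands) links)
  | fuel + 1, p, seen, cache =>
    let c := (PySem.List.pyGet? commands p).getD ""   -- commands[p]; in range under Pre_
    if !cache.contains p && PySem.Str.startswith c "!" then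
      match bangArg? c with
      | some i => termLoop commands fuel (i - 1) (seen ++ [p]) cache
      | none => ("", cache)         -- int() ValueError: excluded by Pre_
    else
      let t := match cache.get? p with
        | some t => t
        | none => c
      (t, seen.foldl (fun d q => d.insert q t) cache)

-- B's loop body: resolve position p to its terminal command and count its category
def bstep (commands : List String) (acc : (Int × Int × Int) × PySem.Dict Int String) (p : Int) : (Int × Int × Int) × PySem.Dict Int String :=
  let cmd := (PySem.List.pyGet? commands p).getD ""
  let r := if PySem.Str.startswith cmd "!" then termLoop commands (commands.length + 1) p [] acc.2 else (cmd, acc.2)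
  let counts :=
    if r.1 == "ls" then (acc.1.1 + 1, acc.1.2.1, acc.1.2.2)
    else if r.1 == "cp" then (acc.1.1, acc.1.2.1 + 1, acc.1.2.2)
    else if r.1 == "mv" then (acc.1.1, acc.1.2.1, acc.1.2.2 + 1)
    else acc.1
  (counts, r.2)

def solution_alt (commands : List String) : List Int :=
  let r := (PySem.List.pyRange 0 (commands.length : Int) 1).foldl (bstep commands) ((0, 0, 0), PySem.Dict.empty)
  [r.1.2.1, r.1.1, r.1.2.2]

-- ===== PRECONDITION & SPEC =====
-- terminal command of the reference chain starting at position p (none = no terminal within the fuel)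
def chainTerm (commands : List String) : Nat → Int → Option String
  | 0, _ => none
  | fuel + 1, p =>
    match PySem.List.pyGet? commands p with
    | none => none
    | some c =>
      if PySem.Str.startswith c "!" then
        match bangArg? c with
        | some i => chainTerm commands fuel (i - 1)
        | none => none
      else some c

-- a command is admissible if it is nonempty and, when it is a '!' reference, its index parses and is a
-- valid (possibly negative, Python-style) 1-based index into the list
def cmdOk (commands : List String) (c : String) : Bool :=
  decide (c ≠ "") &&
    (!(PySem.Str.startswith c "!") ||
      (bangArg? c).any (fun i => decide (1 - (commands.length : Int) ≤ i ∧ i ≤ (commands.length : Int))))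

-- Pre_ excludes: empty command strings and unparseable or out-of-range '!' indices (A raises IndexError /
-- ValueError there), and cyclic reference chains (A's second loop grows its own worklist forever: A diverges).
def Pre_solution (commands : List String) : Prop :=
  (∀ c ∈ commands, cmdOk commands c = true) ∧
  (∀ p ∈ List.range commands.length, (chainTerm commands (commands.length + 1) (p : Int)).isSome = true)
instance (commands : List String) : Decidable (Pre_solution commands) := by unfold Pre_solution; infer_instance

def pvWitness_solution : List String := ["!2", "ls", "cp", "!-1", "mv", "!1"]

def Spec_solution (commands : List String) (out : List Int) : Prop := out = solution_alt commands
instance (commands : List String) (out : List Int) : Decidable (Spec_solution commands out) := by unfold Spec_solution; infer_instance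

-- ===== CLAIM (what is proved, stated in full; the proofs are below) =====
def Claim_equal_solution : Prop := ∀ (commands : List String), Dom_solution commands → Pre_solution commands → Spec_solution commands (solution commands)

-- ===== LEMMAS AND PROOFS =====

-- category vector (ls, cp, mv) of one terminal command
def catv (t : String) : Int × Int × Int :=
  (if t = "ls" then 1 else 0, if t = "cp" then 1 else 0, if t = "mv" then 1 else 0)

-- number of worklist items A spends on the chain from position p (none within the fuel = cycle)
def chainSteps (commands : List String) : Nat → Int → Option Nat
  | 0, _ => none
  | fuel + 1, p =>
    match PySem.List.pyGet? commands p with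
    | none => none
    | some c =>
      if PySem.Str.startswith c "!" then
        match bangArg? c with
        | some i => (chainSteps commands fuel (i - 1)).map (· + 1)
        | none => none
      else some 1

-- contribution of one command: its own category plus, if it is a reference, the category of its chain's terminal
def gcontrib (commands : List String) (c : String) : Int × Int × Int :=
  catv c +
    (if PySem.Str.startswith c "!" then
      match bangArg? c with
      | some i => catv ((chainTerm commands (commands.length + 1) (i - 1)).getD "")
      | none => 0
    else 0)

-- index collected by A's first loop (none if not a '!' command / unparseable)
def idxOf? (c : String) : Option Int := if PySem.Str.pyGet? c 0 == some '!' then bangArg? c else none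

-- the cache only ever holds correct terminals
def CacheInv (commands : List String) (cache : PySem.Dict Int String) : Prop :=
  ∀ p t, cache.get? p = some t → chainTerm commands (commands.length + 1) p = some t

theorem bang_first_char (c : String) :
    (PySem.Str.pyGet? c 0 == some '!') = PySem.Str.startswith c "!" := by
  rw [PySem.Str.startswith, PySem.Str.pyGet?]
  cases hl : c.toList with
  | nil => simp [PySem.Chars.startswith, PySem.Chars.pyGet?_eq_listPyGet?, PySem.List.pyGet?, PySem.List.pyIdx?]
  | cons x xs => simp [PySem.Chars.startswith, PySem.Chars.pyGet?_eq_listPyGet?, PySem.List.pyGet?, PySem.List.pyIdx?, List.isPrefixOf, eq_comm]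

theorem catv_of_bang (c : String) (h : PySem.Str.startswith c "!" = true) : catv c = (0, 0, 0) := by
  have h1 : c ≠ "ls" := by rintro rfl; exact absurd h (by decide)
  have h2 : c ≠ "cp" := by rintro rfl; exact absurd h (by decide)
  have h3 : c ≠ "mv" := by rintro rfl; exact absurd h (by decide)
  simp [catv, h1, h2, h3]

theorem stepAdd (t : String) (a : Int × Int × Int) :
    ((if t == "ls" then a.1 + 1 else a.1),
     (if t == "cp" then a.2.1 + 1 else a.2.1),
     (if t == "mv" then a.2.2 + 1 else a.2.2)) = a + catv t := by
  obtain ⟨x, y, z⟩ := a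
  simp only [catv, Prod.mk_add_mk, beq_iff_eq, Prod.mk.injEq]
  refine ⟨?_, ?_, ?_⟩ <;> split_ifs <;> simp

theorem stepAddB (t : String) (a : Int × Int × Int) :
    (if t == "ls" then (a.1 + 1, a.2.1, a.2.2)
     else if t == "cp" then (a.1, a.2.1 + 1, a.2.2)
     else if t == "mv" then (a.1, a.2.1, a.2.2 + 1)
     else a) = a + catv t := by
  obtain ⟨x, y, z⟩ := a
  simp only [catv, Prod.mk_add_mk, beq_iff_eq]
  split_ifs <;> simp_all

theorem chainSteps_le (commands : List String) (f : Nat) (p : Int) (k : Nat)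
    (h : chainSteps commands f p = some k) : k ≤ f := by
  induction f generalizing p k with
  | zero => simp [chainSteps] at h
  | succ f ih =>
    simp only [chainSteps] at h
    cases hc : PySem.List.pyGet? commands p with
    | none => simp [hc] at h
    | some c =>
      simp only [hc] at h
      by_cases hb : PySem.Str.startswith c "!" = true
      · simp only [hb, if_true] at h
        cases ha : bangArg? c with
        | none => simp [ha] at h
        | some i =>
          simp only [ha, Option.map_eq_some_iff] at h
          obtain ⟨k', hk', rfl⟩ := h
          have := ih _ _ hk'; omega
      · simp only [hb] at h; simp at h; omega

theorem pass1step_eq (a : Int × Int × Int) (ix : List Int) (c : String) :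
    pass1step (a, ix) c = (a + catv c, ix ++ (idxOf? c).toList) := by
  rw [pass1step.eq_def]
  dsimp only
  rw [idxOf?]
  refine Prod.ext ?_ ?_
  · exact stepAdd c a
  · simp only [PySem.Str.pyGet?, PySem.Chars.pyGet?_eq_listPyGet?, beq_iff_eq]
    by_cases hp : PySem.List.pyGet? c.toList 0 = some '!'
    · simp only [hp, if_true]
      cases h : bangArg? c <;> simp
    · simp [hp]

theorem pass1_eq (commands : List String) (a : Int × Int × Int) (ix : List Int) :
    commands.foldl pass1step (a, ix) =
      (a + (commands.map catv).sum, ix ++ commands.filterMap idxOf?) := by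
  induction commands generalizing a ix with
  | nil => simp
  | cons c cs ih =>
    simp only [List.foldl_cons, List.map_cons, List.sum_cons, List.filterMap_cons, pass1step_eq]
    rw [ih]
    refine Prod.ext ?_ ?_
    · simp [add_assoc]
    · cases h : idxOf? c <;> simp [h]

theorem chainTerm_mono (commands : List String) (f g : Nat) (p : Int) (t : String)
    (hfg : f ≤ g) (h : chainTerm commands f p = some t) : chainTerm commands g p = some t := by
  induction f generalizing g p with
  | zero => simp [chainTerm] at h
  | succ f ih =>
    obtain ⟨g, rfl⟩ : ∃ g', g = g' + 1 := ⟨g - 1, by omega⟩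
    simp only [chainTerm] at h ⊢
    cases hc : PySem.List.pyGet? commands p with
    | none => simp [hc] at h
    | some c =>
      simp only [hc] at h ⊢
      by_cases hb : PySem.Str.startswith c "!" = true
      · simp only [hb, if_true] at h ⊢
        cases ha : bangArg? c with
        | none => simp [ha] at h
        | some i => simp only [ha] at h ⊢; exact ih _ _ (by omega) h
      · simp only [hb] at h ⊢; simpa using h

theorem chainSteps_mono (commands : List String) (f g : Nat) (p : Int) (k : Nat)
    (hfg : f ≤ g) (h : chainSteps commands f p = some k) : chainSteps commands g p = some k := by
  induction f generalizing g p k with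
  | zero => simp [chainSteps] at h
  | succ f ih =>
    obtain ⟨g, rfl⟩ : ∃ g', g = g' + 1 := ⟨g - 1, by omega⟩
    simp only [chainSteps] at h ⊢
    cases hc : PySem.List.pyGet? commands p with
    | none => simp [hc] at h
    | some c =>
      simp only [hc] at h ⊢
      by_cases hb : PySem.Str.startswith c "!" = true
      · simp only [hb, if_true] at h ⊢
        cases ha : bangArg? c with
        | none => simp [ha] at h
        | some i =>
          simp only [ha, Option.map_eq_some_iff] at h ⊢
          obtain ⟨k', hk', rfl⟩ := h
          exact ⟨k', ih _ _ _ (by omega) hk', rfl⟩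
      · simp only [hb] at h ⊢; simpa using h

theorem chainSteps_of_term (commands : List String) (f : Nat) (p : Int) (t : String)
    (h : chainTerm commands f p = some t) :
    ∃ k, chainSteps commands f p = some k ∧ 1 ≤ k ∧ k ≤ f := by
  induction f generalizing p with
  | zero => simp [chainTerm] at h
  | succ f ih =>
    simp only [chainTerm] at h
    simp only [chainSteps]
    cases hc : PySem.List.pyGet? commands p with
    | none => simp [hc] at h
    | some c =>
      simp only [hc] at h ⊢
      by_cases hb : PySem.Str.startswith c "!" = true
      · simp only [hb, if_true] at h ⊢
        cases ha : bangArg? c with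
        | none => simp [ha] at h
        | some i =>
          simp only [ha] at h ⊢
          obtain ⟨k, hk, h1, h2⟩ := ih _ h
          exact ⟨k + 1, by simp [hk], by omega, by omega⟩
      · simp only [hb] at h ⊢; exact ⟨1, rfl, by omega, by omega⟩

-- Python's negative indexing: commands[p] = commands[p + n] for -n ≤ p < 0
theorem pyGet?_shift (commands : List String) (p : Int)
    (h1 : -(commands.length : Int) ≤ p) (h2 : p < 0) :
    PySem.List.pyGet? commands p = PySem.List.pyGet? commands (p + commands.length) := by
  have hn : (0 : Int) < commands.length := by omega
  simp only [PySem.List.pyGet?, PySem.List.pyIdx?]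
  rw [if_neg (show ¬ (0:Int) ≤ p by omega), if_pos h1,
      if_pos (show (0:Int) ≤ p + commands.length by omega),
      if_pos (show p + (commands.length : Int) < commands.length by omega)]
  have hab : commands.length - (-p).toNat = (p + (commands.length : Int)).toNat := by omega
  rw [hab]

-- under Pre_, every in-range nonnegative position has a chain terminal
theorem term_of_pos (commands : List String) (hpre : Pre_solution commands) (p : Int)
    (h0 : 0 ≤ p) (h1 : p < (commands.length : Int)) :
    ∃ t, chainTerm commands (commands.length + 1) p = some t := by
  obtain ⟨-, h2⟩ := hpre
  have hm : p.toNat ∈ List.range commands.length := List.mem_range.mpr (by omega)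
  have := h2 p.toNat hm
  rw [Option.isSome_iff_exists] at this
  obtain ⟨t, ht⟩ := this
  exact ⟨t, by rwa [show ((p.toNat : Nat) : Int) = p by omega] at ht⟩

-- under Pre_, the chain from a Pre_-admissible 1-based index i (starting at raw position i-1) has a terminal
theorem term_of_idx (commands : List String) (hpre : Pre_solution commands) (i : Int)
    (h1 : 1 - (commands.length : Int) ≤ i) (h2 : i ≤ (commands.length : Int))
    (hne : commands ≠ []) :
    ∃ t, chainTerm commands (commands.length + 1) (i - 1) = some t := by
  have hn : (0 : Int) < commands.length := by
    have := List.length_pos_iff.mpr hne; exact_mod_cast this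
  by_cases h0 : 0 ≤ i - 1
  · exact term_of_pos commands hpre (i - 1) h0 (by omega)
  · obtain ⟨t, ht⟩ := term_of_pos commands hpre (i - 1 + commands.length) (by omega) (by omega)
    refine ⟨t, ?_⟩
    simp only [chainTerm] at ht ⊢
    rw [pyGet?_shift commands (i - 1) (by omega) (by omega)]
    exact ht

-- facts Pre_ gives about a command that is a '!' reference
theorem pre_bang_facts (commands : List String) (hpre : Pre_solution commands) (c : String)
    (hc : c ∈ commands) (hb : PySem.Str.startswith c "!" = true) :
    ∃ i, bangArg? c = some i ∧ 1 - (commands.length : Int) ≤ i ∧ i ≤ (commands.length : Int) := by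
  have := hpre.1 c hc
  rw [cmdOk, Bool.and_eq_true] at this
  have h2 := this.2
  rw [hb] at h2
  simp only [Bool.not_true, Bool.false_or, Option.any_eq_true] at h2
  obtain ⟨i, hi, hd⟩ := h2
  exact ⟨i, hi, by simpa using hd⟩

theorem loopA_spec (commands : List String) (hpre : Pre_solution commands) :
    ∀ (fuel : Nat) (q : List Int) (acc : Int × Int × Int),
    (∀ i ∈ q, 1 - (commands.length : Int) ≤ i ∧ i ≤ (commands.length : Int)) →
    (q.map (fun i => (chainSteps commands (commands.length + 1) (i - 1)).getD 0)).sum ≤ fuel →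
    loopA commands fuel q acc =
      acc + (q.map (fun i => catv ((chainTerm commands (commands.length + 1) (i - 1)).getD ""))).sum := by
  intro fuel
  induction fuel with
  | zero =>
    intro q acc hb hf
    cases q with
    | nil => simp [loopA]
    | cons i rest =>
      exfalso
      have hbi := hb i (by simp)
      have hne : commands ≠ [] := by
        rintro rfl; simp at hbi; omega
      obtain ⟨t, ht⟩ := term_of_idx commands hpre i hbi.1 hbi.2 hne
      obtain ⟨k, hk, hk1, -⟩ := chainSteps_of_term commands _ _ _ ht
      simp only [List.map_cons, List.sum_cons, hk, Option.getD_some] at hf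
      omega
  | succ fuel ih =>
    intro q acc hb hf
    cases q with
    | nil => simp [loopA]
    | cons i rest =>
      have hbi := hb i (by simp)
      have hne : commands ≠ [] := by
        rintro rfl; simp at hbi; omega
      obtain ⟨t, ht⟩ := term_of_idx commands hpre i hbi.1 hbi.2 hne
      obtain ⟨k, hk, hk1, hk2⟩ := chainSteps_of_term commands _ _ _ ht
      -- unfold one step of the chain at i-1
      have htu := ht
      have hku := hk
      simp only [chainTerm] at htu
      simp only [chainSteps] at hku
      cases hc : PySem.List.pyGet? commands (i - 1) with
      | none => rw [hc] at htu; simp at htu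
      | some c =>
        rw [hc] at htu hku
        have hcm : c ∈ commands := PySem.List.mem_of_pyGet?_eq_some commands hc
        simp only [loopA, hc]
        rw [stepAdd]
        simp only [List.map_cons, List.sum_cons, hk, Option.getD_some] at hf
        by_cases hbang : PySem.Str.startswith c "!" = true
        · -- reference: A pushes the parsed target onto the worklist
          rw [catv_of_bang c hbang, show ((0,0,0) : Int × Int × Int) = 0 from rfl, add_zero]
          simp only [hbang, if_true] at htu hku ⊢
          obtain ⟨j, hj, hj1, hj2⟩ := pre_bang_facts commands hpre c hcm hbang
          rw [hj] at htu hku ⊢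
          rw [bang_first_char, hbang]  -- the '!' test in loopA
          have htu' : chainTerm commands commands.length (j - 1) = some t := htu
          have hku' : Option.map (fun x => x + 1) (chainSteps commands commands.length (j - 1)) = some k := hku
          rw [Option.map_eq_some_iff] at hku'
          obtain ⟨k', hk', hkk⟩ := hku'
          have hk'' : chainSteps commands (commands.length + 1) (j - 1) = some k' :=
            chainSteps_mono commands _ _ _ _ (by omega) hk'
          have ht'' : chainTerm commands (commands.length + 1) (j - 1) = some t :=
            chainTerm_mono commands _ _ _ _ (by omega) htu'
          simp only [eq_self_iff_true, if_true]
          show loopA commands fuel (rest ++ [j]) acc = _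
          rw [ih (rest ++ [j]) acc
            (by intro x hx
                rcases List.mem_append.mp hx with hx | hx
                · exact hb x (by simp [hx])
                · simp at hx; subst hx; exact ⟨hj1, hj2⟩)
            (by rw [List.map_append, List.sum_append]
                simp only [List.map_cons, List.sum_cons, List.map_nil, List.sum_nil, hk'', Option.getD_some]
                omega)]
          rw [List.map_append, List.sum_append, List.map_cons, List.sum_cons, List.map_nil, List.sum_nil,
              List.map_cons, List.sum_cons, ht, ht'']
          simp only [Option.getD_some]
          rw [add_zero, add_comm ((List.map (fun i => catv ((chainTerm commands (commands.length + 1) (i - 1)).getD "")) rest).sum) (catv t)]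
        · simp only [hbang, if_false] at htu
          simp only [Bool.not_eq_true] at hbang
          rw [bang_first_char, hbang]
          simp only [Bool.false_eq_true, if_false]
          have htc : c = t := by simpa using htu
          have hkc : k = 1 := by
            have hku' : (if PySem.Str.startswith c "!" = true then
                match bangArg? c with
                | some i => Option.map (fun x => x + 1) (chainSteps commands commands.length (i - 1))
                | none => none
              else some 1) = some k := hku
            rw [hbang] at hku'
            simpa using hku'.symm
          rw [ih rest (acc + catv c)
            (by intro x hx; exact hb x (by simp [hx]))
            (by omega)]
          rw [List.map_cons, List.sum_cons, ht, Option.getD_some, ← htc, add_assoc]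

theorem cacheInv_fold (commands : List String) (t : String) (seen : List Int) (cache : PySem.Dict Int String)
    (hc : CacheInv commands cache)
    (hs : ∀ q ∈ seen, chainTerm commands (commands.length + 1) q = some t) :
    CacheInv commands (seen.foldl (fun d q => d.insert q t) cache) := by
  induction seen generalizing cache with
  | nil => exact hc
  | cons q qs ih =>
    simp only [List.foldl_cons]
    refine ih (cache.insert q t) ?_ (fun x hx => hs x (by simp [hx]))
    intro p u hp
    rw [PySem.Dict.get?_insert] at hp
    by_cases hpq : p = q
    · rw [if_pos hpq] at hp
      cases hp
      subst hpq
      exact hs p (by simp)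
    · rw [if_neg hpq] at hp
      exact hc p u hp

theorem termLoop_spec (commands : List String) (hpre : Pre_solution commands) :
    ∀ (fuel : Nat) (p : Int) (seen : List Int) (cache : PySem.Dict Int String) (t : String) (k : Nat),
    CacheInv commands cache →
    chainTerm commands (commands.length + 1) p = some t →
    chainSteps commands (commands.length + 1) p = some k →
    k ≤ fuel →
    (∀ q ∈ seen, chainTerm commands (commands.length + 1) q = some t) →
    ∃ cache', termLoop commands fuel p seen cache = (t, cache') ∧ CacheInv commands cache' := by
  intro fuel
  induction fuel with
  | zero =>
    intro p seen cache t k hc ht hk hkf hs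
    obtain ⟨k', hk', h1, -⟩ := chainSteps_of_term commands _ _ _ ht
    rw [hk] at hk'
    cases hk'
    omega
  | succ fuel ih =>
    intro p seen cache t k hc ht hk hkf hs
    have htu := ht
    simp only [chainTerm] at htu
    cases hcp : PySem.List.pyGet? commands p with
    | none => rw [hcp] at htu; simp at htu
    | some c =>
      rw [hcp] at htu
      have htu2 : (if PySem.Str.startswith c "!" = true then
          match bangArg? c with
          | some i => chainTerm commands commands.length (i - 1)
          | none => none
        else some c) = some t := htu
      have hcm : c ∈ commands := PySem.List.mem_of_pyGet?_eq_some commands hcp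
      rw [termLoop.eq_def]
      dsimp only
      rw [hcp]
      rw [show ((some c).getD "" : String) = c from rfl]
      by_cases hcont : cache.contains p = true
      · -- cache hit: stop, write back the memo entries
        have hsome : (cache.get? p).isSome := by rw [← PySem.Dict.contains_eq_isSome_get?]; exact hcont
        rw [Option.isSome_iff_exists] at hsome
        obtain ⟨t0, ht0⟩ := hsome
        have ht0t : t0 = t := by
          have h2 := hc p t0 ht0
          rw [h2] at ht
          exact (Option.some.injEq _ _).mp ht
        subst ht0t
        rw [hcont, ht0]
        simp only [Bool.not_true, Bool.false_and, Bool.false_eq_true, if_false]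
        exact ⟨_, rfl, cacheInv_fold commands t0 seen cache hc hs⟩
      · simp only [Bool.not_eq_true] at hcont
        rw [hcont]
        simp only [Bool.not_false, Bool.true_and]
        by_cases hbang : PySem.Str.startswith c "!" = true
        · -- follow the chain one link
          rw [hbang]
          simp only [if_true]
          rw [hbang] at htu2
          simp only [if_true] at htu2
          cases hj : bangArg? c with
          | none => rw [hj] at htu2; simp at htu2
          | some j =>
            rw [hj] at htu2
            have hku := hk
            simp only [chainSteps, hcp, hbang, if_true, hj] at hku
            rw [Option.map_eq_some_iff] at hku
            obtain ⟨k', hk', hkk⟩ := hku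
            refine ih (j - 1) (seen ++ [p]) cache t k'
              hc
              (chainTerm_mono commands _ _ _ _ (by omega) htu2)
              (chainSteps_mono commands _ _ _ _ (by omega) hk')
              (by omega)
              ?_
            intro q hq
            rcases List.mem_append.mp hq with hq | hq
            · exact hs q hq
            · simp at hq; subst hq; exact ht
        · -- terminal command found
          simp only [Bool.not_eq_true] at hbang
          rw [hbang] at htu2 ⊢
          simp only [Bool.false_eq_true, if_false] at htu2 ⊢
          have htc : c = t := by simpa using htu2
          have hget : cache.get? p = none := by
            rw [PySem.Dict.get?_eq_none_iff_contains]
            exact hcont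
          rw [hget]
          subst htc
          exact ⟨_, rfl, cacheInv_fold commands c seen cache hc hs⟩

theorem foldB_spec (commands : List String) (hpre : Pre_solution commands) :
    ∀ (m : Nat) (a : Int), 0 ≤ a → a + m = (commands.length : Int) →
    ∀ (acc : Int × Int × Int) (cache : PySem.Dict Int String), CacheInv commands cache →
    ((PySem.List.pyRange a (commands.length : Int) 1).foldl (bstep commands) (acc, cache)).1 =
      acc + ((PySem.List.pyRange a (commands.length : Int) 1).map
        (fun p => catv ((if PySem.Str.startswith ((PySem.List.pyGet? commands p).getD "") "!" then
            (chainTerm commands (commands.length + 1) p).getD ""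
          else (PySem.List.pyGet? commands p).getD "")))).sum := by
  intro m
  induction m with
  | zero =>
    intro a h0 hsum acc cache hc
    rw [PySem.List.pyRange_one_eq_nil (show (commands.length : Int) ≤ a by omega)]
    simp
  | succ m ih =>
    intro a h0 hsum acc cache hc
    have ha : a < (commands.length : Int) := by
      push_cast at hsum ⊢
      omega
    rw [PySem.List.pyRange_one_cons ha]
    simp only [List.foldl_cons, List.map_cons, List.sum_cons]
    obtain ⟨c, hcp⟩ : ∃ c, PySem.List.pyGet? commands a = some c := by
      have hlt : a.toNat < commands.length := by omega
      refine ⟨commands[a.toNat], ?_⟩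
      simp only [PySem.List.pyGet?, PySem.List.pyIdx?, if_pos h0, if_pos ha]
      simp [hlt]
    obtain ⟨t, ht⟩ := term_of_pos commands hpre a h0 ha
    rw [bstep.eq_def]
    dsimp only
    rw [hcp]
    rw [show ((some c).getD "" : String) = c from rfl]
    by_cases hbang : PySem.Str.startswith c "!" = true
    · rw [hbang]
      simp only [if_true]
      obtain ⟨k, hk, -, hk2⟩ := chainSteps_of_term commands _ _ _ ht
      obtain ⟨cache', htl, hc'⟩ := termLoop_spec commands hpre (commands.length + 1) a [] cache t k hc ht hk (by omega) (by intro q hq; simp at hq)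
      rw [htl]
      rw [stepAddB]
      rw [ih (a + 1) (by omega) (by push_cast at hsum ⊢; omega) (acc + catv t) cache' hc']
      rw [ht]
      simp only [Option.getD_some]
      rw [add_assoc]
    · simp only [Bool.not_eq_true] at hbang
      rw [hbang]
      simp only [Bool.false_eq_true, if_false]
      rw [stepAddB]
      rw [ih (a + 1) (by omega) (by push_cast at hsum ⊢; omega) (acc + catv c) cache hc]
      rw [add_assoc]

theorem gcontrib_eq (commands : List String) (c : String) :
    gcontrib commands c = catv c +
      (match idxOf? c with
       | some i => catv ((chainTerm commands (commands.length + 1) (i - 1)).getD "")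
       | none => 0) := by
  rw [gcontrib, idxOf?, bang_first_char]
  by_cases hb : PySem.Str.startswith c "!" = true
  · rw [hb]
    simp only [if_true]
  · simp only [Bool.not_eq_true] at hb
    rw [hb]
    simp

theorem sum_filterMap_combine (commands : List String) (l : List String) :
    (l.map catv).sum +
      ((l.filterMap idxOf?).map
        (fun i => catv ((chainTerm commands (commands.length + 1) (i - 1)).getD ""))).sum =
      (l.map (gcontrib commands)).sum := by
  induction l with
  | nil => simp
  | cons c cs ih =>
    simp only [List.map_cons, List.sum_cons, List.filterMap_cons]
    rw [gcontrib_eq]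
    cases h : idxOf? c with
    | none =>
      simp only []
      rw [← ih, add_zero]
      abel
    | some i =>
      simp only [List.map_cons, List.sum_cons]
      rw [← ih]
      abel

theorem pointwise_eq (commands : List String) (hpre : Pre_solution commands) (p : Int)
    (h0 : 0 ≤ p) (h1 : p < (commands.length : Int)) :
    catv (if PySem.Str.startswith ((PySem.List.pyGet? commands p).getD "") "!" then
        (chainTerm commands (commands.length + 1) p).getD ""
      else (PySem.List.pyGet? commands p).getD "") =
      gcontrib commands ((PySem.List.pyGet? commands p).getD "") := by
  obtain ⟨c, hcp⟩ : ∃ c, PySem.List.pyGet? commands p = some c := by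
    have hlt : p.toNat < commands.length := by omega
    refine ⟨commands[p.toNat], ?_⟩
    simp only [PySem.List.pyGet?, PySem.List.pyIdx?, if_pos h0, if_pos h1]
    simp [hlt]
  have hcm : c ∈ commands := PySem.List.mem_of_pyGet?_eq_some commands hcp
  rw [hcp]
  rw [show ((some c).getD "" : String) = c from rfl]
  rw [gcontrib]
  by_cases hbang : PySem.Str.startswith c "!" = true
  · rw [hbang]
    simp only [if_true]
    obtain ⟨t, ht⟩ := term_of_pos commands hpre p h0 h1
    obtain ⟨i, hi, -, -⟩ := pre_bang_facts commands hpre c hcm hbang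
    have htu : (if PySem.Str.startswith c "!" = true then
        match bangArg? c with
        | some i => chainTerm commands commands.length (i - 1)
        | none => none
      else some c) = some t := by
      have h2 := ht
      simp only [chainTerm] at h2
      rw [hcp] at h2
      exact h2
    rw [hbang] at htu
    simp only [if_true] at htu
    rw [hi] at htu
    have htu2 : chainTerm commands commands.length (i - 1) = some t := htu
    have ht2 : chainTerm commands (commands.length + 1) (i - 1) = some t :=
      chainTerm_mono commands _ _ _ _ (by omega) htu2
    rw [hi]
    show catv ((chainTerm commands (commands.length + 1) p).getD "") =
      catv c + catv ((chainTerm commands (commands.length + 1) (i - 1)).getD "")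
    rw [ht, ht2]
    simp only [Option.getD_some]
    rw [catv_of_bang c hbang, show ((0,0,0) : Int × Int × Int) = 0 from rfl, zero_add]
  · simp only [Bool.not_eq_true] at hbang
    rw [hbang]
    simp

-- ===== VERDICT (by name: the statement is the Claim_ definition above) =====
theorem solution_spec : Claim_equal_solution := by
  unfold Claim_equal_solution
  intro commands hdom hpre
  unfold Spec_solution
  -- A's side
  rw [solution.eq_def]
  dsimp only
  rw [pass1_eq]
  rw [show (((0,0,0) : Int × Int × Int) + (commands.map catv).sum, ([] : List Int) ++ commands.filterMap idxOf?) =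
      ((commands.map catv).sum, commands.filterMap idxOf?) by rw [List.nil_append, show ((0,0,0) : Int × Int × Int) = 0 from rfl, zero_add]]
  rw [loopA_spec commands hpre _ _ _
    (by intro i hi
        obtain ⟨c, hcm, hic⟩ := List.mem_filterMap.mp hi
        rw [idxOf?] at hic
        by_cases hcond : (PySem.Str.pyGet? c 0 == some '!') = true
        · rw [if_pos hcond] at hic
          rw [bang_first_char] at hcond
          obtain ⟨i', hi', hb1, hb2⟩ := pre_bang_facts commands hpre c hcm hcond
          rw [hi'] at hic
          cases hic
          exact ⟨hb1, hb2⟩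
        · simp only [Bool.not_eq_true] at hcond
          rw [if_neg (by
            simp only [PySem.Str.pyGet?, PySem.Chars.pyGet?_eq_listPyGet?, beq_eq_false_iff_ne, ne_eq] at hcond
            simpa using hcond)] at hic
          cases hic)
    (by have hb : ∀ x ∈ ((commands.filterMap idxOf?).map
            (fun i => (chainSteps commands (commands.length + 1) (i - 1)).getD 0)), x ≤ commands.length + 1 := by
          intro x hx
          obtain ⟨i, -, hxe⟩ := List.mem_map.mp hx
          cases hcs : chainSteps commands (commands.length + 1) (i - 1) with
          | none => rw [hcs] at hxe; simp at hxe; omega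
          | some k =>
            rw [hcs] at hxe
            simp only [Option.getD_some] at hxe
            subst hxe
            exact chainSteps_le commands _ _ _ hcs
        have hlen := List.sum_le_card_nsmul _ _ hb
        have hl2 : ((commands.filterMap idxOf?).map
            (fun i => (chainSteps commands (commands.length + 1) (i - 1)).getD 0)).length ≤ commands.length := by
          rw [List.length_map]
          exact List.length_filterMap_le _ _
        have := Nat.mul_le_mul hl2 (Nat.le_refl (commands.length + 1))
        simp only [smul_eq_mul] at hlen
        calc _ ≤ _ := hlen
          _ ≤ _ := by
            have h3 : (commands.length + 1) * (commands.length + 1) = (commands.length + 1) * (commands.length + 1) := rfl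
            nlinarith [hl2])]
  rw [sum_filterMap_combine commands commands]
  -- B's side
  rw [solution_alt.eq_def]
  dsimp only
  rw [foldB_spec commands hpre commands.length 0 (by omega) (by omega) (0, 0, 0) PySem.Dict.empty
    (by intro p t h; rw [PySem.Dict.get?_empty] at h; cases h)]
  have hmapeq : ((PySem.List.pyRange 0 (commands.length : Int) 1).map
      (fun p => catv (if PySem.Str.startswith ((PySem.List.pyGet? commands p).getD "") "!" then
          (chainTerm commands (commands.length + 1) p).getD ""
        else (PySem.List.pyGet? commands p).getD ""))) =
      ((PySem.List.pyRange 0 (commands.length : Int) 1).map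
        ((gcontrib commands) ∘ (fun j => PySem.List.pyGetD commands j ""))) :=
    List.map_congr_left (fun p hp => by
      have hm := PySem.List.mem_pyRange_one.mp hp
      simp only [Function.comp_apply, PySem.List.pyGetD]
      exact pointwise_eq commands hpre p hm.1 hm.2)
  rw [hmapeq, ← List.map_map, PySem.List.map_pyGetD_pyRange_zero']
  rw [show (((0,0,0) : Int × Int × Int)) = 0 from rfl, zero_add]
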